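-- pv_equiv track=rewrite | github.com/RapidAPI-research/RapidAPI-research | code/search_android_api.py | get_collect_data_from_data_safety_section
-- ===== SOURCE A (Python) =====
-- def get_collect_data_from_data_safety_section(data_safety):
--     data_collect = 0
--     apk_collected_data = []
--     for line in data_safety:
--         if line == 'Data collected':
--             data_collect = 1
--             continue
--         if line == 'Security practices':
--             break
--         if data_collect == 1:
--             if line == 'expand_more':
--                 continue
--             if ',' in line:
--                 apk_collected_data = apk_collected_data + line.lower().split(',')
--             elif 'and' in line:
--                 apk_collected_data = apk_collected_data + line.lower().split(' and ')
--             else: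
--                 apk_collected_data = apk_collected_data + [line.lower()]
--     return apk_collected_data
-- ===== SOURCE B (Python) =====
-- def get_collect_data_from_data_safety_section(data_safety):
--     # Region-then-map decomposition: locate the slice between the first
--     # 'Data collected' marker and the first 'Security practices' line,
--     # then flatten the expanded lines with a comprehension.
--     try:
--         stop = data_safety.index('Security practices')
--     except ValueError:
--         stop = len(data_safety)
--     head = data_safety[:stop]
--     try:
--         start = head.index('Data collected') + 1
--     except ValueError:
--         return []
--
--     def expand(line):
--         low = line.lower()
--         if ',' in line:
--             return low.split(',')
--         if 'and' in line:
--             return low.split(' and ')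
--         return [low]
--
--     return [item
--             for line in head[start:]
--             if line not in ('Data collected', 'expand_more')
--             for item in expand(line)]
-- ===== Notes on version B (the rewrite author's own statement) =====
-- stated objective: alternative
-- what changed: Replaced the one-flag state machine (flag set on 'Data collected', break on 'Security practices', repeated list concatenation) by an explicit region-then-map decomposition: find the 'Security practices' cutoff and the 'Data collected' marker with list.index, slice out the region, then flatten the expanded lines with one comprehension.
import Mathlib
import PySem

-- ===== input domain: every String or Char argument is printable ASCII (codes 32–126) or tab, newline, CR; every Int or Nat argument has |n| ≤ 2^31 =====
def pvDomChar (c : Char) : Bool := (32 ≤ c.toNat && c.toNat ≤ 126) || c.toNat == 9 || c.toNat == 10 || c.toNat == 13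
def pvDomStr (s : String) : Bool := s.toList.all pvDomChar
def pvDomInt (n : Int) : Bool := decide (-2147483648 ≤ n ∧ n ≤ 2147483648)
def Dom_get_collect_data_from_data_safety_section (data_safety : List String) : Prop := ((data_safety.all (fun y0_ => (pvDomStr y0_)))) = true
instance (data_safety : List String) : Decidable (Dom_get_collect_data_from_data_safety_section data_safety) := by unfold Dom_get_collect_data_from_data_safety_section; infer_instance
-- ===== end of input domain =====

-- B replaces A's one-flag state machine by a region-then-map decomposition (find the
-- markers with list.index, slice the region, flatten with one comprehension); objective: alternative.

-- ===== PORT A =====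
-- str.split(sep) for a nonempty literal sep, via the PySem Chars primitive (exact)
def pySplit (s sep : String) : List String :=
  (PySem.Chars.splitOn s.toList sep.toList).map (fun cs => String.ofList cs)

-- literal port of A's loop: data_collect flag, running accumulator, break on 'Security practices'
def pvLoopA (dc : Bool) (acc : List String) : List String → List String
  | [] => acc
  | line :: rest =>
    if line == "Data collected" then pvLoopA true acc rest
    else if line == "Security practices" then acc
    else if dc then
      if line == "expand_more" then pvLoopA dc acc rest
      else if PySem.Str.isIn "," line then
        pvLoopA dc (acc ++ pySplit (PySem.Str.lower line) ",") rest
      else if PySem.Str.isIn "and" line then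
        pvLoopA dc (acc ++ pySplit (PySem.Str.lower line) " and ") rest
      else pvLoopA dc (acc ++ [PySem.Str.lower line]) rest
    else pvLoopA dc acc rest

def get_collect_data_from_data_safety_section (data_safety : List String) : List String :=
  pvLoopA false [] data_safety

-- ===== PORT B =====
def pvExpandB (line : String) : List String :=
  let low := PySem.Str.lower line
  if PySem.Str.isIn "," line then pySplit low ","
  else if PySem.Str.isIn "and" line then pySplit low " and "
  else [low]

def get_collect_data_from_data_safety_section_alt (data_safety : List String) : List String :=
  let stop := (PySem.List.index? data_safety "Security practices").getD data_safety.length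
  let head := data_safety.take stop
  match PySem.List.index? head "Data collected" with
  | none => []
  | some i =>
    ((head.drop (i + 1)).filter
        (fun l => !(l == "Data collected" || l == "expand_more"))).flatMap pvExpandB

-- ===== PRECONDITION & SPEC =====
def Spec_get_collect_data_from_data_safety_section (data_safety : List String) (out : List String) : Prop := out = get_collect_data_from_data_safety_section_alt data_safety
instance (data_safety : List String) (out : List String) : Decidable (Spec_get_collect_data_from_data_safety_section data_safety out) := by unfold Spec_get_collect_data_from_data_safety_section; infer_instance

-- ===== CLAIM (what is proved, stated in full; the proofs are below) =====
def Claim_equal_get_collect_data_from_data_safety_section : Prop := ∀ (data_safety : List String), Dom_get_collect_data_from_data_safety_section data_safety → Spec_get_collect_data_from_data_safety_section data_safety (get_collect_data_from_data_safety_section data_safety)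

-- ===== LEMMAS AND PROOFS =====

-- canonical mutual recursion used as a bridge between the two ports
def pvOn : List String → List String
  | [] => []
  | l :: rest =>
    if l = "Data collected" then pvOn rest
    else if l = "Security practices" then []
    else if l = "expand_more" then pvOn rest
    else pvExpandB l ++ pvOn rest

def pvOff : List String → List String
  | [] => []
  | l :: rest =>
    if l = "Data collected" then pvOn rest
    else if l = "Security practices" then []
    else pvOff rest

-- A's loop emits acc ++ (on/off phase result)
theorem pvLoopA_eq (ds : List String) : ∀ (dc : Bool) (acc : List String),
    pvLoopA dc acc ds = acc ++ (if dc then pvOn ds else pvOff ds) := by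
  induction ds with
  | nil => intro dc acc; cases dc <;> simp [pvLoopA, pvOn, pvOff]
  | cons l rest ih =>
    intro dc acc
    by_cases h1 : l = "Data collected"
    · subst h1; cases dc <;> simp [pvLoopA, pvOn, pvOff, ih]
    · by_cases h2 : l = "Security practices"
      · subst h2; cases dc <;> simp [pvLoopA, pvOn, pvOff, h1]
      · cases dc with
        | false => simp [pvLoopA, pvOff, h1, h2, ih]
        | true =>
          by_cases h3 : l = "expand_more"
          · subst h3; simp [pvLoopA, pvOn, h1, h2, ih]
          · simp only [pvLoopA, pvOn, beq_iff_eq, h1, h2, h3, if_false, if_true]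
            simp [pvExpandB, ih]
            split_ifs <;> simp

-- B's region computation equals the on-phase recursion
theorem pvOn_eq (rest : List String) :
    ((rest.take ((PySem.List.index? rest "Security practices").getD rest.length)).filter
        (fun l => !(l == "Data collected" || l == "expand_more"))).flatMap pvExpandB
      = pvOn rest := by
  induction rest with
  | nil => simp [pvOn]
  | cons l rest ih =>
    by_cases h2 : l = "Security practices"
    · subst h2
      rw [PySem.List.index?_cons_self]
      simp [pvOn]
    · rw [PySem.List.index?_cons_of_ne rest h2]
      have htake : ((PySem.List.index? rest "Security practices").map (· + 1)).getD
          (rest.length + 1)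
          = ((PySem.List.index? rest "Security practices").getD rest.length) + 1 := by
        cases PySem.List.index? rest "Security practices" <;> rfl
      simp only [List.length_cons, htake, List.take_succ_cons, List.filter_cons]
      by_cases h1 : l = "Data collected"
      · subst h1
        simp only [pvOn]
        simp at ih ⊢
        exact ih
      · by_cases h3 : l = "expand_more"
        · subst h3
          simp only [pvOn, if_neg (by decide : ¬("expand_more" = "Data collected")),
            if_neg (by decide : ¬("expand_more" = "Security practices"))]
          simp at ih ⊢
          exact ih
        · simp only [pvOn, if_neg h1, if_neg h2, if_neg h3]
          simp [h1, h3] at ih ⊢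
          exact ih

-- B equals the off-phase recursion
theorem pvAlt_eq_pvOff (ds : List String) :
    get_collect_data_from_data_safety_section_alt ds = pvOff ds := by
  induction ds with
  | nil => simp [get_collect_data_from_data_safety_section_alt, pvOff]
  | cons l rest ih =>
    by_cases h2 : l = "Security practices"
    · subst h2
      simp only [get_collect_data_from_data_safety_section_alt]
      rw [PySem.List.index?_cons_self]
      simp [pvOff]
    · have htake : ((PySem.List.index? rest "Security practices").map (· + 1)).getD
          (rest.length + 1)
          = ((PySem.List.index? rest "Security practices").getD rest.length) + 1 := by
        cases PySem.List.index? rest "Security practices" <;> rfl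
      by_cases h1 : l = "Data collected"
      · subst h1
        simp only [get_collect_data_from_data_safety_section_alt]
        rw [PySem.List.index?_cons_of_ne rest h2]
        simp only [List.length_cons, htake, List.take_succ_cons]
        rw [PySem.List.index?_cons_self]
        simp only [List.drop_succ_cons, List.drop_zero]
        simpa [pvOff] using pvOn_eq rest
      · have hskip : pvOff (l :: rest) = pvOff rest := by
          simp [pvOff, h1, h2]
        rw [hskip, ← ih]
        simp only [get_collect_data_from_data_safety_section_alt]
        rw [PySem.List.index?_cons_of_ne rest h2]
        simp only [List.length_cons, htake, List.take_succ_cons]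
        rw [PySem.List.index?_cons_of_ne
          (rest.take ((PySem.List.index? rest "Security practices").getD rest.length)) h1]
        cases hidx : PySem.List.index?
            (rest.take ((PySem.List.index? rest "Security practices").getD rest.length))
            "Data collected" with
        | none => simp
        | some i => simp [List.drop_succ_cons]

-- ===== VERDICT (by name: the statement is the Claim_ definition above) =====
theorem get_collect_data_from_data_safety_section_spec : Claim_equal_get_collect_data_from_data_safety_section := by
  intro ds _
  unfold Spec_get_collect_data_from_data_safety_section get_collect_data_from_data_safety_section
  rw [pvLoopA_eq ds false [], pvAlt_eq_pvOff]
  simp
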